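-- pv_equiv track=rewrite | github.com/davidecenzato/Number-of-runs-BBWT | BBWT_tests.py | Duval
-- ===== SOURCE A (Python) =====
-- def Duval(T):
--     n,i,factors=len(T),0,[]
--     while i < n:
--         j = i+1
--         k = i
--         while (j<n and T[k]<=T[j]):
--             if T[k] < T[j]: k = i-1
--             k += 1
--             j += 1
--         while i <= k:
--             factors.append(T[i:i+(j-k)])
--             i += j-k
--     return factors
-- ===== SOURCE B (Python) =====
-- def Duval(T):
--     # Definition-based factorization: the first Lyndon factor of a word is its
--     # longest prefix that is a Lyndon word (strictly smaller than all of its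
--     # proper suffixes); repeatedly cut off that prefix.
--     n, i, factors = len(T), 0, []
--     while i < n:
--         L = 1
--         for l in range(1, n - i + 1):
--             w = T[i:i+l]
--             if all(w < w[k:] for k in range(1, l)):
--                 L = l
--         factors.append(T[i:i+L])
--         i += L
--     return factors
-- ===== Notes on version B (the rewrite author's own statement) =====
-- stated objective: simpler
-- what changed: B drops Duval's amortized two-pointer scan entirely: at each position it finds the longest prefix that is a Lyndon word by directly testing the definition (the prefix is smaller than each of its proper suffixes), appends it and advances, relying on the theorem that the first factor of the Lyndon factorization is the longest Lyndon prefix.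
import Mathlib
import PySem

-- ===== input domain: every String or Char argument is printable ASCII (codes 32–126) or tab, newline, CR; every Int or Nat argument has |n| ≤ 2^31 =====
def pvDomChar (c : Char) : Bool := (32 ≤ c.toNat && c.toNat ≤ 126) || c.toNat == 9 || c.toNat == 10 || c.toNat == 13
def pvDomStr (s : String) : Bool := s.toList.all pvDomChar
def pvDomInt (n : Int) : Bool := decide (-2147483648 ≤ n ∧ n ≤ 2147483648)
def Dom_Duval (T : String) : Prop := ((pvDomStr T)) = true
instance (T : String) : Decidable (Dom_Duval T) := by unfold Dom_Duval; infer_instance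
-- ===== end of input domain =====

-- B abandons Duval's amortized two-pointer scan: at each position it finds the longest
-- prefix that is a Lyndon word by directly testing the definition (the prefix is smaller
-- than each of its proper suffixes), appends that slice and advances by its length.
-- Each while loop is ported as structural recursion on a fuel argument; every loop makes
-- at most cs.length guarded steps and on exhaustion the base case returns the same state
-- the failing guard would, so with fuel = cs.length the ports compute exactly their Python.

-- the slice T[a:a+l] (all slices taken by either program lie inside the string)
def sl (cs : List Char) (a l : Nat) : List Char := (cs.drop a).take l

-- ===== PORT A =====
-- inner while loop of A: while j<n and T[k]<=T[j]: if T[k]<T[j]: k=i-1; k+=1; j+=1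
-- (the updates 'k=i-1; k+=1' and 'k+=1' are written as k:=i and k:=k+1)
def duvalInnerA (cs : List Char) (i : Nat) : Nat → Nat → Nat → Nat × Nat
  | 0, j, k => (j, k)
  | fuel+1, j, k =>
    if j < cs.length ∧ cs.getD k 'A' ≤ cs.getD j 'A' then
      if cs.getD k 'A' < cs.getD j 'A' then duvalInnerA cs i fuel (j+1) i
      else duvalInnerA cs i fuel (j+1) (k+1)
    else (j, k)

-- inner while loop of A: while i<=k: factors.append(T[i:i+(j-k)]); i += j-k
def duvalAppendA (cs : List Char) (j k : Nat) :
    Nat → Nat → List String → Nat × List String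
  | 0, i, factors => (i, factors)
  | fuel+1, i, factors =>
    if i ≤ k then
      duvalAppendA cs j k fuel (i + (j - k))
        (factors ++ [String.ofList (sl cs i (j - k))])
    else (i, factors)

-- outer while loop of A
def duvalOuterA (cs : List Char) : Nat → Nat → List String → List String
  | 0, _, factors => factors
  | fuel+1, i, factors =>
    if i < cs.length then
      duvalOuterA cs fuel
        (duvalAppendA cs (duvalInnerA cs i cs.length (i+1) i).1
          (duvalInnerA cs i cs.length (i+1) i).2 cs.length i factors).1
        (duvalAppendA cs (duvalInnerA cs i cs.length (i+1) i).1
          (duvalInnerA cs i cs.length (i+1) i).2 cs.length i factors).2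
    else factors

def Duval (T : String) : List String := duvalOuterA T.toList T.toList.length 0 []

-- ===== PORT B =====
-- Python's strict '<' on strings (lexicographic on code points)
def listLt : List Char → List Char → Bool
  | _, [] => false
  | [], _::_ => true
  | a::as, b::bs => decide (a < b) || (a == b && listLt as bs)

-- 'w = T[i:i+l]; all(w < w[k:] for k in range(1, l))'
def isLyn (cs : List Char) (i l : Nat) : Bool :=
  (List.range' 1 (l-1)).all fun k => listLt (sl cs i l) ((sl cs i l).drop k)

-- the for-loop of B: L = last l in range(1, n-i+1) whose prefix is Lyndon, starting from 1
def maxLyn (cs : List Char) (i : Nat) : Nat :=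
  (List.range' 1 (cs.length - i)).foldl (fun L l => if isLyn cs i l then l else L) 1

-- the while loop of B: append the longest Lyndon prefix at i, advance by its length
def duvalOuterB (cs : List Char) : Nat → Nat → List String → List String
  | 0, _, factors => factors
  | fuel+1, i, factors =>
    if i < cs.length then
      duvalOuterB cs fuel (i + maxLyn cs i)
        (factors ++ [String.ofList (sl cs i (maxLyn cs i))])
    else factors

def Duval_alt (T : String) : List String := duvalOuterB T.toList T.toList.length 0 []

-- ===== PRECONDITION & SPEC =====
def Spec_Duval (T : String) (out : List String) : Prop := out = Duval_alt T
instance (T : String) (out : List String) : Decidable (Spec_Duval T out) := by unfold Spec_Duval; infer_instance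

-- ===== CLAIM (what is proved, stated in full; the proofs are below) =====
def Claim_equal_Duval : Prop := ∀ (T : String), Dom_Duval T → Spec_Duval T (Duval T)

-- ===== LEMMAS AND PROOFS =====

-- basic slice facts
lemma sl_len (cs : List Char) (a l : Nat) (h : a + l ≤ cs.length) : (sl cs a l).length = l := by
  simp [sl]; omega

lemma sl_getD (cs : List Char) (a l x : Nat) (hx : x < l) (h : a + l ≤ cs.length) :
    (sl cs a l).getD x 'A' = cs.getD (a + x) 'A' := by
  have h1 : x < (sl cs a l).length := by rw [sl_len cs a l h]; exact hx
  rw [List.getD_eq_getElem _ _ h1, List.getD_eq_getElem _ _ (show a + x < cs.length by omega)]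
  simp [sl]

lemma sl_drop (cs : List Char) (a l k : Nat) : (sl cs a l).drop k = sl cs (a+k) (l-k) := by
  simp [sl, List.drop_take, List.drop_drop]

-- index characterisation of Python's '<' on char lists
def LtIdx (u v : List Char) : Prop :=
  ∃ q, (∀ x, x < q → u.getD x 'A' = v.getD x 'A') ∧
    ((q < u.length ∧ q < v.length ∧ u.getD q 'A' < v.getD q 'A') ∨
     (q = u.length ∧ u.length < v.length))

lemma listLt_iff (u : List Char) : ∀ (v : List Char), listLt u v = true ↔ LtIdx u v := by
  induction u with
  | nil =>
    intro v
    cases v with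
    | nil =>
      constructor
      · intro h; simp [listLt] at h
      · rintro ⟨q, _, hd⟩
        rcases hd with ⟨h1, _, _⟩ | ⟨_, h2⟩
        · simp at h1
        · simp at h2
    | cons b bs =>
      constructor
      · intro _; exact ⟨0, fun x hx => by omega, Or.inr ⟨rfl, by simp⟩⟩
      · intro _; rfl
  | cons a as ih =>
    intro v
    cases v with
    | nil =>
      constructor
      · intro h; simp [listLt] at h
      · rintro ⟨q, _, hd⟩
        rcases hd with ⟨_, h2, _⟩ | ⟨_, h2⟩ <;> simp at h2
    | cons b bs =>
      constructor
      · intro h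
        simp only [listLt, Bool.or_eq_true, Bool.and_eq_true, decide_eq_true_eq,
          beq_iff_eq] at h
        rcases h with h | ⟨hab, h⟩
        · exact ⟨0, fun x hx => by omega, Or.inl ⟨by simp, by simp, by simpa using h⟩⟩
        · obtain ⟨q, hag, hd⟩ := (ih bs).mp h
          refine ⟨q+1, ?_, ?_⟩
          · intro x hx
            cases x with
            | zero => simpa using hab
            | succ x => simpa using hag x (by omega)
          · rcases hd with ⟨h1, h2, h3⟩ | ⟨h1, h2⟩
            · exact Or.inl ⟨by simpa using h1, by simpa using h2, by simpa using h3⟩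
            · exact Or.inr ⟨by simp [h1], by simpa using h2⟩
      · rintro ⟨q, hag, hd⟩
        simp only [listLt, Bool.or_eq_true, Bool.and_eq_true, decide_eq_true_eq,
          beq_iff_eq]
        cases q with
        | zero =>
          rcases hd with ⟨_, _, h3⟩ | ⟨h1, _⟩
          · exact Or.inl (by simpa using h3)
          · simp at h1
        | succ q =>
          have hab : a = b := by simpa using hag 0 (by omega)
          refine Or.inr ⟨hab, (ih bs).mpr ⟨q, ?_, ?_⟩⟩
          · intro x hx; simpa using hag (x+1) (by omega)
          · rcases hd with ⟨h1, h2, h3⟩ | ⟨h1, h2⟩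
            · exact Or.inl ⟨by simpa using h1, by simpa using h2, by simpa using h3⟩
            · exact Or.inr ⟨by simpa using h1, by simpa using h2⟩

-- 'the prefix cs[i:i+p] is a Lyndon word', stated through LtIdx
def LynP (cs : List Char) (i p : Nat) : Prop :=
  ∀ m, 1 ≤ m → m < p → LtIdx (sl cs i p) (sl cs (i+m) (p-m))

lemma isLyn_iff (cs : List Char) (i l : Nat) : isLyn cs i l = true ↔ LynP cs i l := by
  unfold isLyn LynP
  rw [List.all_eq_true]
  constructor
  · intro h m h1 h2
    have hm := h m (List.mem_range'_1.mpr ⟨h1, by omega⟩)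
    rw [sl_drop] at hm
    exact (listLt_iff _ _).mp hm
  · intro h k hk
    obtain ⟨hk1, hk2⟩ := List.mem_range'_1.mp hk
    rw [sl_drop]
    exact (listLt_iff _ _).mpr (h k hk1 (by omega))

-- the scanned prefix cs[i:j] is periodic with period p
def Peri (cs : List Char) (i p j : Nat) : Prop :=
  ∀ x, i + p ≤ x → x < j → cs.getD x 'A' = cs.getD (x - p) 'A'

-- in the periodic region, every character equals the corresponding character of the root
lemma root_eq (cs : List Char) (i p j : Nat) (hp : 1 ≤ p) (hper : Peri cs i p j) :
    ∀ x, i ≤ x → x < j → cs.getD x 'A' = cs.getD (i + (x - i) % p) 'A' := by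
  intro x
  induction x using Nat.strong_induction_on with
  | _ x ih =>
    intro hix hxj
    by_cases hx : x < i + p
    · have h1 : (x - i) % p = x - i := Nat.mod_eq_of_lt (by omega)
      rw [h1]
      congr 1
      omega
    · have h1 : cs.getD x 'A' = cs.getD (x - p) 'A' := hper x (by omega) hxj
      have h2 := ih (x - p) (by omega) (by omega) (by omega)
      rw [h1, h2]
      have h3 : (x - p - i) % p = (x - i) % p := by
        conv_rhs => rw [show x - i = (x - p - i) + p by omega, Nat.add_mod_right]
      rw [h3]

-- Lyndon-ness of the root is preserved when the scan reads a strictly larger character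
lemma lyn_extend (cs : List Char) (i p j : Nat) (hp : 1 ≤ p) (hij : i + p ≤ j)
    (hjn : j < cs.length) (hper : Peri cs i p j) (hlyn : LynP cs i p)
    (hc : cs.getD (i + (j - i) % p) 'A' < cs.getD j 'A') :
    LynP cs i (j + 1 - i) := by
  intro m h1m hm
  set d := (j - i) % p with hdd
  have hd_lt : d < p := Nat.mod_lt _ (by omega)
  have hil' : i + (j + 1 - i) ≤ cs.length := by omega
  have lenu : (sl cs i (j + 1 - i)).length = j + 1 - i := sl_len _ _ _ hil'
  have lenv : (sl cs (i + m) (j + 1 - i - m)).length = j + 1 - i - m :=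
    sl_len _ _ _ (by omega)
  have hmj : m ≤ j - i := by omega
  set xbar := j - i - m with hxb
  have hjx : i + m + xbar = j := by omega
  by_cases hm0 : m % p = 0
  · -- m is a multiple of the period: the suffix agrees with the word up to the position
    -- of the new, strictly larger character
    have hpm : p ∣ m := Nat.dvd_of_mod_eq_zero hm0
    have hmp : p ≤ m := Nat.le_of_dvd (by omega) hpm
    refine ⟨xbar, ?_, Or.inl ⟨?_, ?_, ?_⟩⟩
    · intro x hx
      rw [sl_getD _ _ _ x (by omega) hil', sl_getD _ _ _ x (by omega) (by omega)]
      have e1 := root_eq cs i p j hp hper (i + x) (by omega) (by omega)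
      have e2 := root_eq cs i p j hp hper (i + m + x) (by omega) (by omega)
      obtain ⟨s, hs⟩ := hpm
      rw [show i + x - i = x by omega] at e1
      rw [show i + m + x - i = p * s + x by omega, Nat.mul_add_mod] at e2
      rw [e1, e2]
    · rw [lenu]; omega
    · rw [lenv]; omega
    · rw [sl_getD _ _ _ xbar (by omega) hil', sl_getD _ _ _ xbar (by omega) (by omega)]
      rw [hjx]
      have e := root_eq cs i p j hp hper (i + xbar) (by omega) (by omega)
      have hxd : xbar % p = d := by
        obtain ⟨s, hs⟩ := hpm
        have : (xbar + p * s) % p = xbar % p := Nat.add_mul_mod_self_left xbar p s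
        rw [hdd, show j - i = xbar + p * s by omega, this]
      rw [show i + xbar - i = xbar by omega, hxd] at e
      rw [e]
      exact hc
  · -- m is not a multiple of the period: reuse the mismatch that makes the root Lyndon
    set m'' := m % p with hm''
    have h1m'' : 1 ≤ m'' := by omega
    have hm''p : m'' < p := Nat.mod_lt _ (by omega)
    obtain ⟨q, hag0, hd0⟩ := hlyn m'' h1m'' hm''p
    have lenu0 : (sl cs i p).length = p := sl_len _ _ _ (by omega)
    have lenv0 : (sl cs (i + m'') (p - m'')).length = p - m'' := sl_len _ _ _ (by omega)
    rcases hd0 with ⟨hq1, hq2, hq3⟩ | ⟨hq1, hq2⟩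
    · rw [lenu0] at hq1
      rw [lenv0] at hq2
      have hag : ∀ x, x < q → cs.getD (i + x) 'A' = cs.getD (i + m'' + x) 'A' := by
        intro x hx
        have ha := hag0 x hx
        rw [sl_getD _ _ _ x (by omega) (by omega),
          sl_getD _ _ _ x (by omega) (by omega)] at ha
        exact ha
      have hq3' : cs.getD (i + q) 'A' < cs.getD (i + m'' + q) 'A' := by
        rw [sl_getD _ _ _ q (by omega) (by omega),
          sl_getD _ _ _ q (by omega) (by omega)] at hq3
        exact hq3
      have sred : ∀ x, x ≤ q → i + m + x < j →
          cs.getD (i + m + x) 'A' = cs.getD (i + m'' + x) 'A' := by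
        intro x hx hxj
        have e := root_eq cs i p j hp hper (i + m + x) (by omega) hxj
        rw [show i + m + x - i = m + x by omega] at e
        have hmx : (m + x) % p = m'' + x := by
          rw [Nat.add_mod m x p, Nat.mod_eq_of_lt (show x < p by omega), ← hm'']
          exact Nat.mod_eq_of_lt (by omega)
        rw [hmx, ← Nat.add_assoc] at e
        exact e
      by_cases hcase : q < xbar
      · refine ⟨q, ?_, Or.inl ⟨?_, ?_, ?_⟩⟩
        · intro x hx
          rw [sl_getD _ _ _ x (by omega) hil', sl_getD _ _ _ x (by omega) (by omega)]
          rw [sred x (by omega) (by omega)]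
          exact hag x hx
        · rw [lenu]; omega
        · rw [lenv]; omega
        · rw [sl_getD _ _ _ q (by omega) hil', sl_getD _ _ _ q (by omega) (by omega)]
          rw [sred q le_rfl (by omega)]
          exact hq3'
      · have hxq : xbar ≤ q := by omega
        have hxd : xbar + m'' = d := by
          have e1 : (xbar + m) % p = d := by
            rw [hdd, show xbar + m = j - i by omega]
          have e2 : (xbar + m) % p = (xbar + m'') % p := by
            conv_lhs => rw [Nat.add_mod]
            conv_rhs => rw [Nat.add_mod]
            rw [← hm'', Nat.mod_mod_of_dvd]
            exact dvd_rfl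
          have e3 : (xbar + m'') % p = xbar + m'' := Nat.mod_eq_of_lt (by omega)
          omega
        refine ⟨xbar, ?_, Or.inl ⟨?_, ?_, ?_⟩⟩
        · intro x hx
          rw [sl_getD _ _ _ x (by omega) hil', sl_getD _ _ _ x (by omega) (by omega)]
          rw [sred x (by omega) (by omega)]
          exact hag x (by omega)
        · rw [lenu]; omega
        · rw [lenv]; omega
        · rw [sl_getD _ _ _ xbar (by omega) hil', sl_getD _ _ _ xbar (by omega) (by omega)]
          rw [hjx]
          rcases Nat.eq_or_lt_of_le hxq with hq | hq
          · have h5 : cs.getD (i + xbar) 'A' < cs.getD (i + d) 'A' := by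
              have := hq3'
              rw [← hq] at this
              rw [show i + m'' + xbar = i + d by omega] at this
              exact this
            exact h5.trans hc
          · have h5 := hag xbar hq
            rw [show i + m'' + xbar = i + d by omega] at h5
            rw [h5]
            exact hc
    · rw [lenu0] at hq1
      rw [lenu0, lenv0] at hq2
      omega

-- no prefix longer than the period is Lyndon once the scan has stopped
lemma lyn_max (cs : List Char) (i p j : Nat) (hp : 1 ≤ p) (hij : i + p ≤ j)
    (hjn : j ≤ cs.length) (hper : Peri cs i p j)
    (hexit : j = cs.length ∨ cs.getD j 'A' < cs.getD (i + (j - i) % p) 'A') :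
    ∀ l, p < l → i + l ≤ cs.length → ¬ LynP cs i l := by
  intro l hl hln hcon
  have lenu : (sl cs i l).length = l := sl_len _ _ _ hln
  by_cases hcase : l ≤ j - i
  · -- a prefix longer than the period has the root as a border, so it is not Lyndon
    obtain ⟨q, hag, hd⟩ := hcon p (by omega) hl
    have lenv : (sl cs (i + p) (l - p)).length = l - p := sl_len _ _ _ (by omega)
    rcases hd with ⟨h1, h2, h3⟩ | ⟨h1, h2⟩
    · rw [lenu] at h1
      rw [lenv] at h2
      rw [sl_getD _ _ _ q (by omega) hln, sl_getD _ _ _ q (by omega) (by omega)] at h3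
      have hpq := hper (i + p + q) (by omega) (by omega)
      rw [show i + p + q - p = i + q by omega] at hpq
      rw [hpq] at h3
      exact lt_irrefl _ h3
    · rw [lenu] at h1
      rw [lenu, lenv] at h2
      omega
  · -- a prefix reaching past the mismatch is beaten by the suffix starting at the last
    -- full copy of the root
    have hjn' : j < cs.length := by omega
    have hcj : cs.getD j 'A' < cs.getD (i + (j - i) % p) 'A' := by
      rcases hexit with h | h
      · omega
      · exact h
    have hd_lt : (j - i) % p < p := Nat.mod_lt _ (by omega)
    set d := (j - i) % p with hdd
    set r := (j - i) - d with hrr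
    have hmd := Nat.mod_add_div (j - i) p
    have ht1 : 1 ≤ (j - i) / p := (Nat.one_le_div_iff (by omega)).mpr (by omega)
    have hr_ge : p ≤ r := by
      have h2 : p * 1 ≤ p * ((j - i) / p) := Nat.mul_le_mul_left p ht1
      omega
    have hpr : p ∣ r := ⟨(j - i) / p, by omega⟩
    obtain ⟨q, hag, hd2⟩ := hcon r (by omega) (by omega)
    have lenv : (sl cs (i + r) (l - r)).length = l - r := sl_len _ _ _ (by omega)
    have key : ∀ x, x < d → cs.getD (i + r + x) 'A' = cs.getD (i + x) 'A' := by
      intro x hx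
      have e := root_eq cs i p j (by omega) hper (i + r + x) (by omega) (by omega)
      obtain ⟨s, hs⟩ := hpr
      rw [show i + r + x - i = p * s + x by omega, Nat.mul_add_mod,
        Nat.mod_eq_of_lt (by omega)] at e
      exact e
    have hjd : i + r + d = j := by omega
    rcases hd2 with ⟨h1, h2, h3⟩ | ⟨h1, h2⟩
    · rw [lenu] at h1
      rw [lenv] at h2
      rw [sl_getD _ _ _ q (by omega) hln, sl_getD _ _ _ q (by omega) (by omega)] at h3
      rcases Nat.lt_trichotomy q d with hq | hq | hq
      · rw [key q hq] at h3
        exact lt_irrefl _ h3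
      · rw [hq, hjd] at h3
        exact lt_irrefl _ (h3.trans hcj)
      · have ha := hag d (by omega)
        rw [sl_getD _ _ _ d (by omega) hln, sl_getD _ _ _ d (by omega) (by omega)] at ha
        rw [hjd] at ha
        rw [ha] at hcj
        exact lt_irrefl _ hcj
    · rw [lenu] at h1
      rw [lenu, lenv] at h2
      omega

-- Lyndon-ness transfers to any position congruent to i inside the periodic region
lemma lyn_shift (cs : List Char) (i p j i' : Nat) (hp : 1 ≤ p) (hper : Peri cs i p j)
    (hlyn : LynP cs i p) (hi : i ≤ i') (hdvd : p ∣ (i' - i)) (hij : i' + p ≤ j)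
    (hjn : j ≤ cs.length) : LynP cs i' p := by
  have key : ∀ z, z < p → cs.getD (i' + z) 'A' = cs.getD (i + z) 'A' := by
    intro z hz
    have e := root_eq cs i p j hp hper (i' + z) (by omega) (by omega)
    obtain ⟨s, hs⟩ := hdvd
    rw [show i' + z - i = p * s + z by omega, Nat.mul_add_mod, Nat.mod_eq_of_lt hz] at e
    exact e
  intro m h1 h2
  obtain ⟨q, hag, hd⟩ := hlyn m h1 h2
  rcases hd with ⟨hq1, hq2, hq3⟩ | ⟨hq1, hq2⟩
  · rw [sl_len _ _ _ (by omega)] at hq1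
    rw [sl_len _ _ _ (by omega)] at hq2
    refine ⟨q, ?_, Or.inl ⟨?_, ?_, ?_⟩⟩
    · intro x hx
      have ha := hag x hx
      rw [sl_getD _ _ _ x (by omega) (by omega), sl_getD _ _ _ x (by omega) (by omega)] at ha
      rw [sl_getD _ _ _ x (by omega) (by omega), sl_getD _ _ _ x (by omega) (by omega)]
      rw [key x (by omega), show i' + m + x = i' + (m + x) by omega, key (m + x) (by omega)]
      rw [show i + (m + x) = i + m + x by omega]
      exact ha
    · rw [sl_len _ _ _ (by omega)]; omega
    · rw [sl_len _ _ _ (by omega)]; omega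
    · rw [sl_getD _ _ _ q (by omega) (by omega), sl_getD _ _ _ q (by omega) (by omega)] at hq3
      rw [sl_getD _ _ _ q (by omega) (by omega), sl_getD _ _ _ q (by omega) (by omega)]
      rw [key q (by omega), show i' + m + q = i' + (m + q) by omega, key (m + q) (by omega)]
      rw [show i + (m + q) = i + m + q by omega]
      exact hq3
  · rw [sl_len cs i p (by omega)] at hq1
    rw [sl_len cs i p (by omega), sl_len cs (i + m) (p - m) (by omega)] at hq2
    omega

-- two aligned chunks of the periodic region carry the same characters
lemma sl_period (cs : List Char) (i p j i' : Nat) (hp : 1 ≤ p) (hper : Peri cs i p j)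
    (hi : i ≤ i') (hdvd : p ∣ (i' - i)) (hij : i' + p ≤ j) (hjn : j ≤ cs.length) :
    sl cs i' p = sl cs i p := by
  apply List.ext_getElem
  · rw [sl_len _ _ _ (by omega), sl_len _ _ _ (by omega)]
  · intro m h1 h2
    have hm : m < p := by rw [sl_len _ _ _ (by omega)] at h1; exact h1
    have e1 := root_eq cs i p j hp hper (i' + m) (by omega) (by omega)
    obtain ⟨s, hs⟩ := hdvd
    rw [show i' + m - i = p * s + m by omega, Nat.mul_add_mod, Nat.mod_eq_of_lt hm] at e1
    have g1 : cs.getD (i' + m) 'A' = cs[i' + m]'(by omega) :=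
      List.getD_eq_getElem cs 'A' (by omega)
    have g2 : cs.getD (i + m) 'A' = cs[i + m]'(by omega) :=
      List.getD_eq_getElem cs 'A' (by omega)
    rw [g1, g2] at e1
    simpa [sl] using e1

-- folding 'if good l then l else acc' over a block of bad values keeps the state
lemma foldl_skip (good : Nat → Bool) (L : List Nat) (s : Nat)
    (h : ∀ x ∈ L, good x = false) :
    L.foldl (fun a l => if good l then l else a) s = s := by
  induction L generalizing s with
  | nil => rfl
  | cons y t ih =>
    simp only [List.foldl_cons, h y (by simp)]
    exact ih _ (fun x hx => h x (by simp [hx]))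

lemma foldl_ge_one (good : Nat → Bool) (L : List Nat) (s : Nat) (hs : 1 ≤ s)
    (h : ∀ x ∈ L, 1 ≤ x) :
    1 ≤ L.foldl (fun a l => if good l then l else a) s := by
  induction L generalizing s with
  | nil => exact hs
  | cons y t ih =>
    simp only [List.foldl_cons]
    by_cases hy : good y = true
    · rw [if_pos hy]; exact ih _ (h y (by simp)) (fun x hx => h x (by simp [hx]))
    · rw [if_neg hy]; exact ih _ hs (fun x hx => h x (by simp [hx]))

lemma maxLyn_pos (cs : List Char) (i : Nat) : 1 ≤ maxLyn cs i := by
  apply foldl_ge_one _ _ _ le_rfl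
  intro x hx
  have := List.mem_range'_1.mp hx
  omega

-- B's for-loop returns exactly p when the prefix of length p is Lyndon and no longer one is
lemma maxLyn_eq (cs : List Char) (i p : Nat) (hp : 1 ≤ p) (hpn : i + p ≤ cs.length)
    (hgood : isLyn cs i p = true)
    (hbad : ∀ l, p < l → i + l ≤ cs.length → isLyn cs i l = false) :
    maxLyn cs i = p := by
  unfold maxLyn
  have hsplit : List.range' 1 (cs.length - i) =
      (List.range' 1 (p - 1) ++ [p]) ++ List.range' (p + 1) (cs.length - i - p) := by
    have h1 : List.range' 1 (p - 1 + 1) 1 = List.range' 1 (p - 1) 1 ++ [1 + 1 * (p - 1)] :=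
      List.range'_concat
    rw [show p - 1 + 1 = p by omega, show 1 + 1 * (p - 1) = p by omega] at h1
    rw [← h1]
    have h2 : List.range' 1 p 1 ++ List.range' (1 + 1 * p) (cs.length - i - p) 1 =
        List.range' 1 (p + (cs.length - i - p)) 1 := List.range'_append
    rw [show 1 + 1 * p = p + 1 by omega, show p + (cs.length - i - p) = cs.length - i by omega] at h2
    rw [h2]
  rw [hsplit, List.foldl_append, List.foldl_append]
  rw [List.foldl_cons, List.foldl_nil, hgood, if_pos rfl]
  apply foldl_skip
  intro x hx
  obtain ⟨hx1, hx2⟩ := List.mem_range'_1.mp hx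
  exact hbad x (by omega) (by omega)

-- loop invariant of A's inner scan: i ≤ k < j ≤ n is preserved
lemma innerA_bounds (cs : List Char) (i : Nat) : ∀ fuel j k,
    i ≤ k → k < j → j ≤ cs.length →
    i ≤ (duvalInnerA cs i fuel j k).2 ∧
      (duvalInnerA cs i fuel j k).2 < (duvalInnerA cs i fuel j k).1 ∧
      (duvalInnerA cs i fuel j k).1 ≤ cs.length := by
  intro fuel
  induction fuel with
  | zero => intro j k hik hkj hj; exact ⟨hik, hkj, hj⟩
  | succ fuel ih =>
    intro j k hik hkj hj
    rw [duvalInnerA]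
    by_cases hc : j < cs.length ∧ cs.getD k 'A' ≤ cs.getD j 'A'
    · rw [if_pos hc]
      by_cases hlt : cs.getD k 'A' < cs.getD j 'A'
      · rw [if_pos hlt]; exact ih (j+1) i (le_refl i) (by omega) (by omega)
      · rw [if_neg hlt]; exact ih (j+1) (k+1) (by omega) (by omega) (by omega)
    · rw [if_neg hc]; exact ⟨hik, hkj, hj⟩

-- A's inner scan maintains periodicity and Lyndon-ness of the root and ends at a mismatch
lemma innerA_inv (cs : List Char) (i : Nat) : ∀ fuel j k,
    i ≤ k → k < j → j ≤ cs.length → cs.length ≤ j + fuel →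
    Peri cs i (j - k) j → LynP cs i (j - k) →
    Peri cs i ((duvalInnerA cs i fuel j k).1 - (duvalInnerA cs i fuel j k).2)
        (duvalInnerA cs i fuel j k).1 ∧
      LynP cs i ((duvalInnerA cs i fuel j k).1 - (duvalInnerA cs i fuel j k).2) ∧
      ((duvalInnerA cs i fuel j k).1 = cs.length ∨
        cs.getD (duvalInnerA cs i fuel j k).1 'A' < cs.getD (duvalInnerA cs i fuel j k).2 'A') := by
  intro fuel
  induction fuel with
  | zero =>
    intro j k hik hkj hjn hfuel hper hlyn
    simp only [duvalInnerA]
    exact ⟨hper, hlyn, Or.inl (by omega)⟩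
  | succ fuel ih =>
    intro j k hik hkj hjn hfuel hper hlyn
    rw [duvalInnerA]
    by_cases hc : j < cs.length ∧ cs.getD k 'A' ≤ cs.getD j 'A'
    · rw [if_pos hc]
      have hval : cs.getD k 'A' = cs.getD (i + (j - i) % (j - k)) 'A' := by
        have h1 := root_eq cs i (j - k) j (by omega) hper k hik hkj
        have h2 : (k - i) % (j - k) = (j - i) % (j - k) := by
          conv_rhs => rw [show j - i = (k - i) + (j - k) by omega, Nat.add_mod_right]
        rw [h2] at h1
        exact h1
      by_cases hlt : cs.getD k 'A' < cs.getD j 'A'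
      · rw [if_pos hlt]
        have hlyn' : LynP cs i (j + 1 - i) :=
          lyn_extend cs i (j - k) j (by omega) (by omega) hc.1 hper hlyn
            (by rw [← hval]; exact hlt)
        have hper' : Peri cs i (j + 1 - i) (j + 1) := by intro x hx1 hx2; omega
        exact ih (j + 1) i le_rfl (by omega) (by omega) (by omega) hper' hlyn'
      · rw [if_neg hlt]
        have heq : cs.getD k 'A' = cs.getD j 'A' := le_antisymm hc.2 (not_lt.mp hlt)
        have hper' : Peri cs i (j + 1 - (k + 1)) (j + 1) := by
          rw [show j + 1 - (k + 1) = j - k by omega]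
          intro x hx1 hx2
          by_cases hxj : x < j
          · exact hper x hx1 hxj
          · have hxx : x = j := by omega
            subst hxx
            rw [← heq]
            congr 1
            omega
        have hlyn' : LynP cs i (j + 1 - (k + 1)) := by
          rw [show j + 1 - (k + 1) = j - k by omega]
          exact hlyn
        exact ih (j + 1) (k + 1) (by omega) (by omega) (by omega) (by omega) hper' hlyn'
    · rw [if_neg hc]
      refine ⟨hper, hlyn, ?_⟩
      rcases Nat.lt_or_ge j cs.length with h | h
      · exact Or.inr (not_le.mp (fun hle => hc ⟨h, hle⟩))
      · exact Or.inl (by omega)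

-- under periodicity, each later chunk of length p equals the one p positions earlier
lemma chunk_eq (cs : List Char) (i0 p j a : Nat) (hper : Peri cs i0 p j) (hp : 1 ≤ p)
    (ha : i0 + p ≤ a) (haj : a + p ≤ j) (hj : j ≤ cs.length) :
    (cs.drop a).take p = (cs.drop (a - p)).take p := by
  apply List.ext_getElem
  · simp; omega
  · intro m h1 h2
    simp only [List.getElem_take, List.getElem_drop]
    have hx := hper (a + m) (by omega) (by simp at h1; omega)
    have hm : m < p := by simp at h1; omega
    have e1 : cs.getD (a + m) 'A' = cs[a + m]'(by omega) := List.getD_eq_getElem cs 'A' (by omega)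
    have e2 : cs.getD (a + m - p) 'A' = cs[a - p + m]'(by omega) := by
      rw [show a + m - p = a - p + m by omega]
      exact List.getD_eq_getElem cs 'A' (by omega)
    rw [e1, e2] at hx
    exact hx

-- A's append loop produces exactly t = (j-i)/p copies of the root
lemma appendA_eq (cs : List Char) (i0 p j : Nat) (hper : Peri cs i0 p j) (hp : 1 ≤ p)
    (hpj : i0 + p ≤ j) (hj : j ≤ cs.length) :
    ∀ t fuel i factors, i0 ≤ i → (j - i) / p = t → t ≤ fuel →
      duvalAppendA cs j (j - p) fuel i factors =
        (i + p * t, factors ++ List.replicate t (String.ofList (sl cs i p))) := by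
  intro t
  induction t with
  | zero =>
    intro fuel i factors hi ht _
    have hlt : j - i < p := by
      rcases Nat.lt_or_ge (j - i) p with h | h
      · exact h
      · exact absurd ((Nat.one_le_div_iff (by omega)).mpr h) (by omega)
    cases fuel with
    | zero => simp [duvalAppendA]
    | succ fuel => rw [duvalAppendA, if_neg (by omega)]; simp
  | succ t ih =>
    intro fuel i factors hi ht hfuel
    have hip : i + p ≤ j := by
      have : 1 ≤ (j - i) / p := by omega
      have := (Nat.one_le_div_iff (by omega : 0 < p)).mp this
      omega
    cases fuel with
    | zero => omega
    | succ fuel =>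
      rw [duvalAppendA, if_pos (by omega)]
      rw [show j - (j - p) = p by omega]
      have ht' : (j - (i + p)) / p = t := by
        have h1 : (j - i) / p = (j - i - p) / p + 1 := Nat.div_eq_sub_div (by omega) (by omega)
        rw [show j - i - p = j - (i + p) by omega] at h1
        omega
      rw [ih fuel (i + p) (factors ++ [String.ofList (sl cs i p)]) (by omega) ht' (by omega)]
      cases t with
      | zero => simp
      | succ t' =>
        have hchunk : sl cs (i + p) p = sl cs i p := by
          have hle : i + p + p ≤ j := by
            have : 1 ≤ (j - (i + p)) / p := by omega
            have := (Nat.one_le_div_iff (by omega : 0 < p)).mp this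
            omega
          have := chunk_eq cs i0 p j (i + p) hper hp (by omega) hle hj
          rw [show i + p - p = i by omega] at this
          simpa [sl] using this
        rw [hchunk]
        refine Prod.ext ?_ ?_
        · simp; ring
        · simp [List.replicate_succ]

-- past the end of the string B's loop is the identity
lemma outerB_ge (cs : List Char) (i : Nat) (hi : cs.length ≤ i) :
    ∀ fuel factors, duvalOuterB cs fuel i factors = factors := by
  intro fuel factors
  cases fuel with
  | zero => rfl
  | succ fuel => rw [duvalOuterB, if_neg (by omega)]

-- B's loop does not depend on the fuel once it is at least the remaining length
lemma outerB_fuel (cs : List Char) : ∀ f1 f2 i factors,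
    cs.length - i ≤ f1 → cs.length - i ≤ f2 →
    duvalOuterB cs f1 i factors = duvalOuterB cs f2 i factors := by
  intro f1
  induction f1 with
  | zero =>
    intro f2 i factors h1 h2
    rw [outerB_ge cs i (by omega), outerB_ge cs i (by omega)]
  | succ f1 ih =>
    intro f2 i factors h1 h2
    by_cases hi : i < cs.length
    · cases f2 with
      | zero => omega
      | succ f2 =>
        rw [duvalOuterB, duvalOuterB, if_pos hi, if_pos hi]
        have := maxLyn_pos cs i
        exact ih f2 (i + maxLyn cs i) _ (by omega) (by omega)
    · rw [outerB_ge cs i (by omega), outerB_ge cs i (by omega)]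

-- at every copy boundary inside the periodic region B's for-loop finds exactly the period
lemma boundary (cs : List Char) (i p j i' : Nat) (hp : 1 ≤ p) (hij : i + p ≤ j)
    (hjn : j ≤ cs.length) (hper : Peri cs i p j) (hlyn : LynP cs i p)
    (hexit : j = cs.length ∨ cs.getD j 'A' < cs.getD (i + (j - i) % p) 'A')
    (hi : i ≤ i') (hdvd : p ∣ (i' - i)) (hij' : i' + p ≤ j) :
    maxLyn cs i' = p := by
  have hper' : Peri cs i' p j := fun x h1 h2 => hper x (by omega) h2
  have hlyn' : LynP cs i' p := lyn_shift cs i p j i' hp hper hlyn hi hdvd hij' hjn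
  have hd' : (j - i') % p = (j - i) % p := by
    obtain ⟨s, hs⟩ := hdvd
    conv_rhs => rw [show j - i = (j - i') + p * s by omega, Nat.add_mul_mod_self_left]
  have hexit' : j = cs.length ∨ cs.getD j 'A' < cs.getD (i' + (j - i') % p) 'A' := by
    rcases hexit with h | h
    · exact Or.inl h
    · right
      have hdlt : (j - i') % p < p := Nat.mod_lt _ (by omega)
      have e1 := root_eq cs i p j hp hper (i' + (j - i') % p) (by omega) (by omega)
      obtain ⟨s, hs⟩ := hdvd
      rw [show i' + (j - i') % p - i = p * s + (j - i') % p by omega, Nat.mul_add_mod,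
        Nat.mod_eq_of_lt hdlt, hd'] at e1
      rw [hd', e1]
      exact h
  apply maxLyn_eq cs i' p hp (by omega)
  · rw [isLyn_iff]
    exact hlyn'
  · intro l hl hln
    have hnot := lyn_max cs i' p j hp hij' hjn hper' hexit' l hl hln
    rcases Bool.eq_false_or_eq_true (isLyn cs i' l) with h | h
    · exact absurd ((isLyn_iff cs i' l).mp h) hnot
    · exact h

-- B performs the t copies of one A-round one factor at a time
lemma B_run (cs : List Char) (i p j : Nat) (hp : 1 ≤ p) (hij : i + p ≤ j)
    (hjn : j ≤ cs.length) (hper : Peri cs i p j) (hlyn : LynP cs i p)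
    (hexit : j = cs.length ∨ cs.getD j 'A' < cs.getD (i + (j - i) % p) 'A') :
    ∀ m fuel i' factors, cs.length - i' ≤ fuel → i ≤ i' → p ∣ (i' - i) →
      i' + m * p = i + ((j - i) / p) * p →
      duvalOuterB cs fuel i' factors =
        duvalOuterB cs (fuel - m) (i + ((j - i) / p) * p)
          (factors ++ List.replicate m (String.ofList (sl cs i p))) := by
  intro m
  induction m with
  | zero =>
    intro fuel i' factors hfuel hi' hdvd heq
    rw [show i + (j - i) / p * p = i' by omega]
    simp
  | succ m ih =>
    intro fuel i' factors hfuel hi' hdvd heq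
    have htp : (j - i) / p * p ≤ j - i := Nat.div_mul_le_self _ _
    have hexp : (m + 1) * p = m * p + p := by ring
    have hij' : i' + p ≤ j := by omega
    have hi'n : i' < cs.length := by omega
    cases fuel with
    | zero => omega
    | succ fuel =>
      rw [duvalOuterB, if_pos hi'n]
      rw [boundary cs i p j i' hp hij hjn hper hlyn hexit hi' hdvd hij']
      rw [sl_period cs i p j i' hp hper hi' hdvd hij' hjn]
      have hstep := ih fuel (i' + p) (factors ++ [String.ofList (sl cs i p)]) (by omega)
        (by omega)
        (by obtain ⟨s, hs⟩ := hdvd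
            refine ⟨s + 1, ?_⟩
            have hps : p * (s + 1) = p * s + p := by ring
            omega)
        (by omega)
      rw [hstep]
      rw [show fuel + 1 - (m + 1) = fuel - m by omega]
      congr 1
      simp [List.replicate_succ]

-- the two outer loops agree
lemma main_eq (cs : List Char) : ∀ fuel i factors, cs.length - i ≤ fuel →
    duvalOuterA cs fuel i factors = duvalOuterB cs cs.length i factors := by
  intro fuel
  induction fuel with
  | zero =>
    intro i factors h
    rw [outerB_ge cs i (by omega)]
    rfl
  | succ fuel ih =>
    intro i factors h
    by_cases hi : i < cs.length
    · rw [duvalOuterA, if_pos hi]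
      have hb := innerA_bounds cs i cs.length (i + 1) i le_rfl (by omega) (by omega)
      have hinv := innerA_inv cs i cs.length (i + 1) i le_rfl (by omega) (by omega)
        (by omega) (by intro x hx1 hx2; omega) (by intro m h1 h2; omega)
      set j := (duvalInnerA cs i cs.length (i + 1) i).1 with hj
      set k := (duvalInnerA cs i cs.length (i + 1) i).2 with hk
      obtain ⟨hik, hkj, hjn⟩ := hb
      obtain ⟨hper, hlyn, hexit0⟩ := hinv
      have hp : 1 ≤ j - k := by omega
      have hij : i + (j - k) ≤ j := by omega
      have hexit : j = cs.length ∨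
          cs.getD j 'A' < cs.getD (i + (j - i) % (j - k)) 'A' := by
        rcases hexit0 with hh | hh
        · exact Or.inl hh
        · right
          have h1 := root_eq cs i (j - k) j hp hper k hik hkj
          have h2 : (k - i) % (j - k) = (j - i) % (j - k) := by
            conv_rhs => rw [show j - i = (k - i) + (j - k) by omega, Nat.add_mod_right]
          rw [h2] at h1
          rw [← h1]
          exact hh
      set t := (j - i) / (j - k) with ht
      have ht1 : 1 ≤ t := (Nat.one_le_div_iff (by omega)).mpr (by omega)
      have htle : t ≤ cs.length := le_trans (Nat.div_le_self _ _) (by omega)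
      have happ := appendA_eq cs i (j - k) j hper hp hij hjn t cs.length i factors
        le_rfl rfl htle
      rw [show j - (j - k) = k by omega] at happ
      rw [happ]
      have htp1 : 1 ≤ (j - k) * t := by
        have := Nat.le_mul_of_pos_right (j - k) (show 0 < t by omega)
        omega
      rw [ih (i + (j - k) * t) _ (by omega)]
      have hcomm : t * (j - k) = (j - k) * t := by ring
      have hrun := B_run cs i (j - k) j hp hij hjn hper hlyn hexit t cs.length i factors
        (by omega) le_rfl (by simp) (by rw [← ht])
      rw [show i + t * (j - k) = i + (j - k) * t by ring] at hrun
      rw [hrun]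
      apply outerB_fuel
      · exact Nat.sub_le _ _
      · have h2 : t ≤ t * (j - k) := Nat.le_mul_of_pos_right t (by omega)
        exact Nat.sub_le_sub_left (by omega) cs.length
    · rw [duvalOuterA, if_neg hi, outerB_ge cs i (by omega)]

-- ===== VERDICT (by name: the statement is the Claim_ definition above) =====
theorem Duval_spec : Claim_equal_Duval := by
  intro T _
  show Duval T = Duval_alt T
  unfold Duval Duval_alt
  exact main_eq T.toList T.toList.length 0 [] (by omega)
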